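-- pv_equiv track=rewrite | github.com/Jooh34/algorithm | programmers/12987.py | find
-- ===== SOURCE A (Python) =====
-- def find(a,sortB):
--     left=0
--     right=len(sortB)
--     while left<right:
--         mid = (left+right)//2
--         if a < sortB[mid]:
--             right = mid
--         else:
--             left = mid+1
--
--     return left
-- ===== SOURCE B (Python) =====
-- def find(a, sortB):
--     return sum(1 for x in sortB if x <= a)
-- ===== Notes on version B (the rewrite author's own statement) =====
-- stated objective: simpler
-- what changed: Replaces the left/right binary-search loop by a single linear count of elements <= a (the insertion index on any list partitioned about a); Pre_ states bisect's documented contract (elements <= a precede elements > a).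
-- outside the precondition, e.g. on find(0, [5, -1]): A returns 2, B returns 1
import Mathlib
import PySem

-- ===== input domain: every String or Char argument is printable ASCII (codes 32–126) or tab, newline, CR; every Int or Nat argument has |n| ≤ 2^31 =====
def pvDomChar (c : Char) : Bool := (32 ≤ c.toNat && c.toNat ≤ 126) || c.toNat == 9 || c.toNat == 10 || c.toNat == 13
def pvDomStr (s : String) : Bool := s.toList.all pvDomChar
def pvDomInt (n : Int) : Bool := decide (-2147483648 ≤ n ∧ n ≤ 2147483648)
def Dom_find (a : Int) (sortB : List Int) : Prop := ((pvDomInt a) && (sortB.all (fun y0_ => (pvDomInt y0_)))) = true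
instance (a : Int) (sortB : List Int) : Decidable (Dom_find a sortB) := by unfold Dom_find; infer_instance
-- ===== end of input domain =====

-- B replaces the binary search by a single linear count of elements ≤ a (same insertion index on sorted input); objective: simpler.

-- ===== PORT A =====
-- the while-loop of A; state (left, right), terminates because right - left shrinks
def findLoop (a : Int) (sortB : List Int) (left right : Int) : Int :=
  if _h : left < right then
    let mid := PySem.Int.floordiv (left + right) 2
    match _hg : PySem.List.pyGet? sortB mid with
    | some v =>
        if a < v then findLoop a sortB left mid
        else findLoop a sortB (mid + 1) right
    | none => left   -- IndexError; unreachable from find's initial call (0 ≤ left ≤ mid < right ≤ len)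
  else left
termination_by (right - left).toNat
decreasing_by
  all_goals
    have h1 := PySem.Int.floordiv_two_mid_bounds (le_of_lt _h)
    have h2 : PySem.Int.floordiv (left + right) 2 < right := by
      rw [PySem.Int.floordiv_lt_iff_lt_mul (by omega)]; omega
    omega

def find (a : Int) (sortB : List Int) : Int :=
  findLoop a sortB 0 (sortB.length : Int)

-- ===== PORT B =====
-- sum(1 for x in sortB if x <= a)
def find_alt (a : Int) (sortB : List Int) : Int :=
  sortB.foldl (fun acc x => if x ≤ a then acc + 1 else acc) 0

-- ===== PRECONDITION & SPEC =====
-- Pre_ restricts to the function's natural domain, bisect's documented contract: the list is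
-- PARTITIONED with respect to a (every element ≤ a comes before every element > a; any sorted list
-- qualifies). On a non-partitioned list A's probe path returns an accidental index, not an insertion point.
def Pre_find (a : Int) (sortB : List Int) : Prop := List.Pairwise (fun x y => y ≤ a → x ≤ a) sortB
instance (a : Int) (sortB : List Int) : Decidable (Pre_find a sortB) := by unfold Pre_find; infer_instance

def pvWitness_find : Int × List Int := (2, [1, 2, 2, 5])

def Spec_find (a : Int) (sortB : List Int) (out : Int) : Prop := out = find_alt a sortB
instance (a : Int) (sortB : List Int) (out : Int) : Decidable (Spec_find a sortB out) := by unfold Spec_find; infer_instance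

-- ===== CLAIM (what is proved, stated in full; the proofs are below) =====
def Claim_equal_find : Prop := ∀ (a : Int) (sortB : List Int), Dom_find a sortB → Pre_find a sortB → Spec_find a sortB (find a sortB)

-- ===== LEMMAS AND PROOFS =====

-- B's fold computes (count of elements ≤ a), as a Nat cast, from any accumulator
theorem find_alt_foldl (a : Int) (sortB : List Int) (acc : Int) :
    sortB.foldl (fun acc x => if x ≤ a then acc + 1 else acc) acc
      = acc + ((sortB.countP (fun x => x ≤ a) : Nat) : Int) := by
  induction sortB generalizing acc with
  | nil => simp
  | cons x xs ih =>
      simp only [List.foldl_cons, List.countP_cons, ih]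
      by_cases h : x ≤ a
      · simp [h]; omega
      · simp [h]

-- characterisation of the count on a partitioned list: position i holds an element ≤ a iff i < count
theorem count_charac (a : Int) (sortB : List Int) (hs : List.Pairwise (fun x y => y ≤ a → x ≤ a) sortB)
    (i : Nat) (hi : i < sortB.length) :
    (sortB[i] ≤ a ↔ i < sortB.countP (fun x => x ≤ a)) := by
  induction sortB generalizing i with
  | nil => simp at hi
  | cons x xs ih =>
      have hx : ∀ y ∈ xs, y ≤ a → x ≤ a := (List.pairwise_cons.mp hs).1
      have hxs : List.Pairwise (fun x y => y ≤ a → x ≤ a) xs := (List.pairwise_cons.mp hs).2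
      by_cases hxa : x ≤ a
      · have hcc : (x :: xs).countP (fun x => x ≤ a) = xs.countP (fun x => x ≤ a) + 1 := by
          simp [List.countP_cons, hxa]
        cases i with
        | zero => simp only [List.getElem_cons_zero, hcc]; omega
        | succ j =>
            have hj : j < xs.length := by simpa using hi
            have hix := ih hxs j hj
            simp only [List.getElem_cons_succ, hcc]
            omega
      · -- a < x, and everything in xs is ≥ x, so the count is 0
        have hc : xs.countP (fun x => x ≤ a) = 0 := by
          rw [List.countP_eq_zero]
          intro y hy
          simp only [decide_eq_true_eq]
          exact fun hya => hxa (hx y hy hya)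
        have hcc : (x :: xs).countP (fun x => x ≤ a) = 0 := by
          simp [List.countP_cons, hxa, hc]
        cases i with
        | zero => simp only [List.getElem_cons_zero, hcc]; omega
        | succ j =>
            have hj : j < xs.length := by simpa using hi
            have hya : ¬ xs[j] ≤ a :=
              fun h => hxa (hx _ (List.getElem_mem hj) h)
            simp only [List.getElem_cons_succ, hcc]
            omega

-- the loop invariant: if the count c lies in [left, right] ⊆ [0, len], the loop returns c
theorem findLoop_eq_count (a : Int) (sortB : List Int) (hs : List.Pairwise (fun x y => y ≤ a → x ≤ a) sortB) :
    ∀ (n : Nat) (left right : Int), (right - left).toNat ≤ n → 0 ≤ left → right ≤ (sortB.length : Int) →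
      left ≤ ((sortB.countP (fun x => x ≤ a) : Nat) : Int) →
      ((sortB.countP (fun x => x ≤ a) : Nat) : Int) ≤ right →
      findLoop a sortB left right = ((sortB.countP (fun x => x ≤ a) : Nat) : Int) := by
  intro n
  induction n with
  | zero =>
      intro left right hfuel h0 hlen hlc hcr
      rw [findLoop]
      have : ¬ left < right := by omega
      simp only [this, dif_neg, not_false_iff]
      omega
  | succ n ih =>
      intro left right hfuel h0 hlen hlc hcr
      rw [findLoop]
      by_cases h : left < right
      · simp only [h, dif_pos]
        have hmid := PySem.Int.floordiv_two_mid_bounds (le_of_lt h)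
        set mid := PySem.Int.floordiv (left + right) 2 with hmid_def
        have hmlt : mid < right := by
          rw [hmid_def, PySem.Int.floordiv_lt_iff_lt_mul (by omega)]; omega
        have h0m : 0 ≤ mid := by omega
        have hmlen : mid < (sortB.length : Int) := by omega
        have hget : PySem.List.pyGet? sortB mid = some sortB[mid.toNat] :=
          PySem.List.pyGet?_eq_some_getElem sortB h0m hmlen
        rw [hget]
        have hchar := count_charac a sortB hs mid.toNat (by omega)
        by_cases hav : a < sortB[mid.toNat]
        · simp only [hav, if_pos]
          have hcm : ((sortB.countP (fun x => x ≤ a) : Nat) : Int) ≤ mid := by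
            by_contra hcon
            have : sortB[mid.toNat] ≤ a := hchar.mpr (by omega)
            omega
          exact ih left mid (by omega) h0 (by omega) hlc hcm
        · simp only [hav, if_neg, not_false_iff]
          have hcm : mid + 1 ≤ ((sortB.countP (fun x => x ≤ a) : Nat) : Int) := by
            have : sortB[mid.toNat] ≤ a := by omega
            have := hchar.mp this
            omega
          exact ih (mid + 1) right (by omega) (by omega) hlen hcm hcr
      · simp only [h, dif_neg, not_false_iff]
        omega

theorem find_eq (a : Int) (sortB : List Int) (hs : List.Pairwise (fun x y => y ≤ a → x ≤ a) sortB) :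
    find a sortB = find_alt a sortB := by
  have hc : (sortB.countP (fun x => x ≤ a)) ≤ sortB.length := List.countP_le_length
  have h := findLoop_eq_count a sortB hs sortB.length 0 (sortB.length : Int)
    (by omega) (by omega) (by omega) (by exact Int.natCast_nonneg _) (by exact_mod_cast hc)
  rw [find, find_alt, find_alt_foldl, h]
  ring

-- ===== VERDICT (by name: the statement is the Claim_ definition above) =====
theorem find_spec : Claim_equal_find := by
  intro a sortB _ hpre
  exact find_eq a sortB hpre
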